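-- pv_equiv track=rewrite | github.com/dg720/lbs-agent | agent.py | _ensure_useful_links
-- ===== SOURCE A (Python) =====
-- def _ensure_useful_links(agent_reply: str) -> str:
--     """
--     Post-process assistant text to ensure common Useful links are concrete NHS URLs.
--     """
--     if "Useful links" not in agent_reply:
--         return agent_reply
--
--     lines = agent_reply.splitlines()
--     if not any(line.strip().lower().startswith("useful links") for line in lines):
--         return agent_reply
--
--     canonical_links = [
--         ("Find a GP", "https://www.nhs.uk/service-search/find-a-gp"),
--         ("Register with a GP", "https://www.nhs.uk/nhs-services/gps/how-to-register-with-a-gp-surgery/"),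
--         ("Use NHS 111 online", "https://111.nhs.uk/"),
--         ("NHS services guide", "https://www.nhs.uk/using-the-nhs/nhs-services/"),
--         ("LBS health and wellbeing", "https://www.london.edu/masters-experience/student-support"),
--         ("LBS mental wellbeing support", "https://www.london.edu/masters-experience/student-support/mental-health"),
--     ]
--
--     new_section = ["Useful links", *[f"- {title}: {url}" for title, url in canonical_links]]
--
--     rebuilt = []
--     idx = 0
--     replaced = False
--     while idx < len(lines):
--         line = lines[idx]
--         if not replaced and line.strip().lower().startswith("useful links"):
--             # skip old section
--             idx += 1
--             while idx < len(lines) and lines[idx].strip() != "":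
--                 idx += 1
--             rebuilt.extend(new_section)
--             replaced = True
--             continue
--         rebuilt.append(line)
--         idx += 1
--
--     return "\n".join(rebuilt)
-- ===== SOURCE B (Python) =====
-- def _ensure_useful_links(agent_reply: str) -> str:
--     """
--     Post-process assistant text to ensure common Useful links are concrete NHS URLs.
--     """
--     if "Useful links" not in agent_reply:
--         return agent_reply
--
--     lines = agent_reply.splitlines()
--     start = next(
--         (i for i, line in enumerate(lines)
--          if line.strip().lower().startswith("useful links")),
--         None,
--     )
--     if start is None:
--         return agent_reply
--
--     end = start + 1
--     while end < len(lines) and lines[end].strip() != "":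
--         end += 1
--
--     canonical_links = [
--         ("Find a GP", "https://www.nhs.uk/service-search/find-a-gp"),
--         ("Register with a GP", "https://www.nhs.uk/nhs-services/gps/how-to-register-with-a-gp-surgery/"),
--         ("Use NHS 111 online", "https://111.nhs.uk/"),
--         ("NHS services guide", "https://www.nhs.uk/using-the-nhs/nhs-services/"),
--         ("LBS health and wellbeing", "https://www.london.edu/masters-experience/student-support"),
--         ("LBS mental wellbeing support", "https://www.london.edu/masters-experience/student-support/mental-health"),
--     ]
--
--     new_section = ["Useful links", *[f"- {title}: {url}" for title, url in canonical_links]]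
--
--     return "\n".join(lines[:start] + new_section + lines[end:])
-- ===== Notes on version B (the rewrite author's own statement) =====
-- stated objective: simpler
-- what changed: Replaces the flag-driven rebuild loop (append line by line, skipping the old section when a flag flips) with a find-span-then-splice decomposition: locate the section's start index and its end (first blank line), then join lines[:start] + new_section + lines[end:].
import Mathlib
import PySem

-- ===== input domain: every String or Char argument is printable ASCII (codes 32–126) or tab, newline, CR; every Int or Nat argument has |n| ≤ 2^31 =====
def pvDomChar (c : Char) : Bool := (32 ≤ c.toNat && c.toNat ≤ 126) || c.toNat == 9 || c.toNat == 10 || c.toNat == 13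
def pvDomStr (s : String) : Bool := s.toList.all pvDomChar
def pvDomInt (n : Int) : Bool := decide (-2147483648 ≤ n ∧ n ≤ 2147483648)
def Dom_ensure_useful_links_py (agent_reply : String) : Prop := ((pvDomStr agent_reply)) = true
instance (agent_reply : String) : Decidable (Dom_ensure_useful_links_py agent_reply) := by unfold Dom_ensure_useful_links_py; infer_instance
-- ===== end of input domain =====

-- B replaces A's flag-driven rebuild loop by a find-span-then-splice decomposition (simpler); same return value.

-- ===== PORT A =====
-- line.strip().lower().startswith("useful links")
def pvMatchA (line : String) : Bool :=
  PySem.Str.startswith (PySem.Str.lower (PySem.Str.strip line)) "useful links"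

def pvCanonicalA : List (String × String) :=
  [("Find a GP", "https://www.nhs.uk/service-search/find-a-gp"),
   ("Register with a GP", "https://www.nhs.uk/nhs-services/gps/how-to-register-with-a-gp-surgery/"),
   ("Use NHS 111 online", "https://111.nhs.uk/"),
   ("NHS services guide", "https://www.nhs.uk/using-the-nhs/nhs-services/"),
   ("LBS health and wellbeing", "https://www.london.edu/masters-experience/student-support"),
   ("LBS mental wellbeing support", "https://www.london.edu/masters-experience/student-support/mental-health")]

-- f"- {title}: {url}"; exact: string concatenation done on List Char (Lean's own String.append is kernel-opaque)
def pvNewSectionA : List String :=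
  "Useful links" :: pvCanonicalA.map (fun p => String.ofList ("- ".toList ++ p.1.toList ++ ": ".toList ++ p.2.toList))

-- inner 'while idx < len(lines) and lines[idx].strip() != "": idx += 1' (on the remaining lines)
def pvSkipA : List String → List String
  | [] => []
  | l :: rest => if PySem.Str.strip l ≠ "" then pvSkipA rest else l :: rest

theorem pvSkipA_length_le : ∀ ls : List String, (pvSkipA ls).length ≤ ls.length := by
  intro ls
  induction ls with
  | nil => simp [pvSkipA]
  | cons l rest ih =>
    simp only [pvSkipA]
    split
    · exact Nat.le_succ_of_le ih
    · simp

-- outer while loop over the remaining lines, with the 'replaced' flag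
def pvLoopA : List String → Bool → List String
  | [], _ => []
  | l :: rest, replaced =>
    if !replaced && pvMatchA l then
      pvNewSectionA ++ pvLoopA (pvSkipA rest) true
    else
      l :: pvLoopA rest replaced
termination_by ls _ => ls.length
decreasing_by
  · exact Nat.lt_succ_of_le (pvSkipA_length_le rest)
  · simp

def ensure_useful_links_py (agent_reply : String) : String :=
  if ¬ PySem.Str.isIn "Useful links" agent_reply then agent_reply
  else
    let lines := PySem.Str.splitlines agent_reply
    if ¬ lines.any pvMatchA then agent_reply
    else PySem.Str.join "\n" (pvLoopA lines false)

-- ===== PORT B =====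
def pvMatchB (line : String) : Bool :=
  PySem.Str.startswith (PySem.Str.lower (PySem.Str.strip line)) "useful links"

def pvCanonicalB : List (String × String) :=
  [("Find a GP", "https://www.nhs.uk/service-search/find-a-gp"),
   ("Register with a GP", "https://www.nhs.uk/nhs-services/gps/how-to-register-with-a-gp-surgery/"),
   ("Use NHS 111 online", "https://111.nhs.uk/"),
   ("NHS services guide", "https://www.nhs.uk/using-the-nhs/nhs-services/"),
   ("LBS health and wellbeing", "https://www.london.edu/masters-experience/student-support"),
   ("LBS mental wellbeing support", "https://www.london.edu/masters-experience/student-support/mental-health")]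

def pvNewSectionB : List String :=
  "Useful links" :: pvCanonicalB.map (fun p => String.ofList ("- ".toList ++ p.1.toList ++ ": ".toList ++ p.2.toList))

-- 'end = start + 1; while end < len(lines) and lines[end].strip() != "": end += 1'
def pvFindEndB (lines : List String) (e : Nat) : Nat :=
  if h : e < lines.length then
    if PySem.Str.strip lines[e] ≠ "" then pvFindEndB lines (e + 1) else e
  else e
termination_by lines.length - e

def ensure_useful_links_py_alt (agent_reply : String) : String :=
  if ¬ PySem.Str.isIn "Useful links" agent_reply then agent_reply
  else
    let lines := PySem.Str.splitlines agent_reply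
    match lines.findIdx? pvMatchB with
    | none => agent_reply
    | some start =>
        let e := pvFindEndB lines (start + 1)
        PySem.Str.join "\n" (lines.take start ++ pvNewSectionB ++ lines.drop e)

-- ===== PRECONDITION & SPEC =====
def Spec_ensure_useful_links_py (agent_reply : String) (out : String) : Prop := out = ensure_useful_links_py_alt agent_reply
instance (agent_reply : String) (out : String) : Decidable (Spec_ensure_useful_links_py agent_reply out) := by unfold Spec_ensure_useful_links_py; infer_instance

-- ===== CLAIM (what is proved, stated in full; the proofs are below) =====
def Claim_equal_ensure_useful_links_py : Prop := ∀ (agent_reply : String), Dom_ensure_useful_links_py agent_reply → Spec_ensure_useful_links_py agent_reply (ensure_useful_links_py agent_reply)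

-- ===== LEMMAS AND PROOFS =====

-- once the flag is set, A's loop copies the rest unchanged
theorem pvLoopA_true : ∀ ls : List String, pvLoopA ls true = ls := by
  intro ls
  induction ls with
  | nil => simp [pvLoopA]
  | cons l rest ih => simp [pvLoopA, ih]

-- dropping up to B's end index is A's inner skip of the corresponding suffix
theorem pvDrop_findEndB (lines : List String) (e : Nat) :
    lines.drop (pvFindEndB lines e) = pvSkipA (lines.drop e) := by
  have H : ∀ (n e : Nat), lines.length - e ≤ n →
      lines.drop (pvFindEndB lines e) = pvSkipA (lines.drop e) := by
    intro n
    induction n with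
    | zero =>
      intro e he
      have h : ¬ e < lines.length := by omega
      rw [pvFindEndB, dif_neg h, List.drop_eq_nil_of_le (by omega)]
      rfl
    | succ n ih =>
      intro e he
      by_cases h : e < lines.length
      · rw [pvFindEndB, dif_pos h]
        have hd : lines.drop e = lines[e] :: lines.drop (e + 1) := List.drop_eq_getElem_cons h
        by_cases hne : PySem.Str.strip lines[e] ≠ ""
        · rw [if_pos hne, ih (e + 1) (by omega), hd, pvSkipA, if_pos hne]
        · rw [if_neg hne, hd, pvSkipA, if_neg hne]
      · rw [pvFindEndB, dif_neg h, List.drop_eq_nil_of_le (by omega)]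
        rfl
  exact H (lines.length - e) e le_rfl

theorem pvFindEndB_cons (l : String) (rest : List String) (e : Nat) :
    pvFindEndB (l :: rest) (e + 1) = pvFindEndB rest e + 1 := by
  have H : ∀ (n e : Nat), rest.length - e ≤ n →
      pvFindEndB (l :: rest) (e + 1) = pvFindEndB rest e + 1 := by
    intro n
    induction n with
    | zero =>
      intro e he
      have h : ¬ e < rest.length := by omega
      have h' : ¬ e + 1 < (l :: rest).length := by simp; omega
      rw [pvFindEndB, dif_neg h', pvFindEndB, dif_neg h]
    | succ n ih =>
      intro e he
      by_cases h : e < rest.length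
      · have h' : e + 1 < (l :: rest).length := by simp; omega
        conv_lhs => rw [pvFindEndB]
        conv_rhs => rw [pvFindEndB]
        rw [dif_pos h', dif_pos h]
        have hg : (l :: rest)[e + 1] = rest[e] := by simp
        rw [hg]
        by_cases hne : PySem.Str.strip rest[e] ≠ ""
        · rw [if_pos hne, if_pos hne, ih (e + 1) (by omega)]
        · rw [if_neg hne, if_neg hne]
      · have h' : ¬ e + 1 < (l :: rest).length := by simp; omega
        rw [pvFindEndB, dif_neg h', pvFindEndB, dif_neg h]
  exact H (rest.length - e) e le_rfl

-- A's rebuild loop equals B's take/splice/drop when the first matching index is `start`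
theorem pvLoopA_splice : ∀ (lines : List String) (start : Nat),
    lines.findIdx? pvMatchA = some start →
    pvLoopA lines false =
      lines.take start ++ pvNewSectionA ++ lines.drop (pvFindEndB lines (start + 1)) := by
  intro lines
  induction lines with
  | nil => intro start h; simp at h
  | cons l rest ih =>
    intro start h
    rw [List.findIdx?_cons] at h
    by_cases hm : pvMatchA l
    · rw [if_pos hm] at h
      cases h
      rw [pvLoopA]
      simp only [hm, Bool.not_false, Bool.true_and, if_pos]
      rw [pvLoopA_true]
      have : (l :: rest).drop (pvFindEndB (l :: rest) (0 + 1)) = pvSkipA ((l :: rest).drop 1) :=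
        pvDrop_findEndB (l :: rest) 1
      simp only [List.drop_one, List.tail_cons] at this
      simp [this]
    · rw [if_neg hm] at h
      match hk : rest.findIdx? pvMatchA with
      | none => rw [hk] at h; simp at h
      | some k =>
        rw [hk] at h
        simp only [Option.map_some] at h
        cases h
        rw [pvLoopA]
        simp only [hm, Bool.and_false, if_neg, Bool.not_false, Bool.false_eq_true,
          not_false_iff]
        rw [ih k hk]
        rw [pvFindEndB_cons l rest (k + 1)]
        simp [List.take_succ_cons, List.drop_succ_cons]

theorem pvAny_iff_findIdx? (lines : List String) :
    lines.any pvMatchA = false ↔ lines.findIdx? pvMatchB = none := by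
  have : pvMatchB = pvMatchA := rfl
  rw [this, List.findIdx?_eq_none_iff, List.any_eq_false]
  simp

-- ===== VERDICT (by name: the statement is the Claim_ definition above) =====
theorem ensure_useful_links_py_spec : Claim_equal_ensure_useful_links_py := by
  intro agent_reply _
  unfold Spec_ensure_useful_links_py ensure_useful_links_py ensure_useful_links_py_alt
  by_cases h1 : PySem.Str.isIn "Useful links" agent_reply
  · simp only [h1, not_true, if_neg, not_false_iff]
    set lines := PySem.Str.splitlines agent_reply with hl
    by_cases h2 : lines.any pvMatchA
    · have hsome : lines.findIdx? pvMatchB ≠ none := by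
        intro hn
        rw [← pvAny_iff_findIdx?] at hn
        simp [h2] at hn
      match hk : lines.findIdx? pvMatchB with
      | none => exact absurd hk hsome
      | some start =>
        simp only [h2, not_true, if_neg, not_false_iff]
        have hA : lines.findIdx? pvMatchA = some start := hk
        rw [pvLoopA_splice lines start hA]
        rfl
    · have hnone : lines.findIdx? pvMatchB = none :=
        (pvAny_iff_findIdx? lines).mp (by simpa using h2)
      simp [h2, hnone]
  · rw [if_pos h1, if_pos h1]
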